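-- pv_equiv track=rewrite | github.com/Toney823/YXK_Usefull_Tools | YXK_Useful_tools.py | block_cacher_v2
-- ===== SOURCE A (Python) =====
-- def block_cacher_v2(lines: list, separator_first: str):
--     file_blocks = []
--     block = []
--     for line in lines:
--         if len(line) == 0:
--             continue
--         if line.startswith(separator_first):
--             if len(block) > 0:
--                 file_blocks.append(block)
--             block = [line]
--             continue
--         block.append(line)
--     if len(block) > 0:
--         file_blocks.append(block)
--     return file_blocks
-- ===== SOURCE B (Python) =====
-- def block_cacher_v2(lines: list, separator_first: str):
--     xs = [l for l in lines if len(l) > 0]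
--     blocks = []
--     i = 0
--     while i < len(xs):
--         j = i + 1
--         while j < len(xs) and not xs[j].startswith(separator_first):
--             j += 1
--         blocks.append(xs[i:j])
--         i = j
--     return blocks
-- ===== Notes on version B (the rewrite author's own statement) =====
-- stated objective: alternative
-- what changed: Replaces A's accumulate-and-flush fold (carrying a current block and flushing it at separators and at the end) with a filter-then-segment scan: drop empty lines once, then repeatedly scan an index forward to the next separator line and emit the slice between boundaries, so no block accumulator or flush logic exists.
import Mathlib
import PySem

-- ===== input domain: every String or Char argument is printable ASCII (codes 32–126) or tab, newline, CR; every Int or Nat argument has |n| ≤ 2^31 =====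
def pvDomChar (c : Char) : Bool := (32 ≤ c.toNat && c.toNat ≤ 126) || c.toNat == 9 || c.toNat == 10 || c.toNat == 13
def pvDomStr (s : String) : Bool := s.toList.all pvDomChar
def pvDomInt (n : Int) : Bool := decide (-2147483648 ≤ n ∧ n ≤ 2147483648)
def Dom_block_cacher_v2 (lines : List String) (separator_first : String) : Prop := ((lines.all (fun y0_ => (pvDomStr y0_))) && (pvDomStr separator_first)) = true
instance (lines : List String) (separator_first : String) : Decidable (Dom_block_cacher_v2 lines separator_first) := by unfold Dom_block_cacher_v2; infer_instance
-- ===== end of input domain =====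

-- B replaces A's accumulate-and-flush fold with filter + boundary-to-boundary slicing (alternative decomposition, same cost).

-- ===== PORT A =====
-- the loop body of A's for-loop, acting on the state (file_blocks, block)
def pvStepA (separator_first : String) (st : List (List String) × List String) (line : String) :
    List (List String) × List String :=
  if PySem.Str.len line = 0 then st
  else if PySem.Str.startswith line separator_first then
    ((if st.2.length > 0 then st.1 ++ [st.2] else st.1), [line])
  else (st.1, st.2 ++ [line])

def block_cacher_v2 (lines : List String) (separator_first : String) : List (List String) :=
  let st := lines.foldl (pvStepA separator_first) ([], [])
  if st.2.length > 0 then st.1 ++ [st.2] else st.1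

-- ===== PORT B =====
-- inner while loop of Source B: advance j to the next separator line (or the end)
def pvFindJ (separator_first : String) (xs : List String) (j : Nat) : Nat :=
  if h : j < xs.length then
    if ¬ PySem.Str.startswith xs[j] separator_first then pvFindJ separator_first xs (j + 1)
    else j
  else j
termination_by xs.length - j

theorem pvFindJ_ge (separator_first : String) (xs : List String) (j : Nat) :
    j ≤ pvFindJ separator_first xs j := by
  unfold pvFindJ
  split
  · split
    · exact le_trans (Nat.le_succ j) (pvFindJ_ge separator_first xs (j + 1))
    · exact le_refl j
  · exact le_refl j
termination_by xs.length - j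

-- outer while loop of Source B: emit the slice xs[i:j] for each segment, continue at j
def pvOuter (separator_first : String) (xs : List String) (i : Nat) : List (List String) :=
  if h : i < xs.length then
    PySem.List.slice xs (some (i : Int)) (some ((pvFindJ separator_first xs (i + 1)) : Int)) ::
      pvOuter separator_first xs (pvFindJ separator_first xs (i + 1))
  else []
termination_by xs.length - i
decreasing_by
  have := pvFindJ_ge separator_first xs (i + 1)
  omega

def block_cacher_v2_alt (lines : List String) (separator_first : String) : List (List String) :=
  pvOuter separator_first (lines.filter (fun l => PySem.Str.len l > 0)) 0

-- ===== PRECONDITION & SPEC =====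
def Spec_block_cacher_v2 (lines : List String) (separator_first : String) (out : List (List String)) : Prop := out = block_cacher_v2_alt lines separator_first
instance (lines : List String) (separator_first : String) (out : List (List String)) : Decidable (Spec_block_cacher_v2 lines separator_first out) := by unfold Spec_block_cacher_v2; infer_instance

-- ===== CLAIM (what is proved, stated in full; the proofs are below) =====
def Claim_equal_block_cacher_v2 : Prop := ∀ (lines : List String) (separator_first : String), Dom_block_cacher_v2 lines separator_first → Spec_block_cacher_v2 lines separator_first (block_cacher_v2 lines separator_first)

-- ===== LEMMAS AND PROOFS =====

-- the separator test and the non-emptiness test, named so that statements stay compact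
def pvP (sep : String) (l : String) : Bool := !PySem.Str.startswith l sep
def pvQ (l : String) : Bool := decide (PySem.Str.len l > 0)

-- common reference form: blocks of a (pre-filtered) list, by takeWhile/dropWhile recursion
def pvBlocks (sep : String) : List String → List (List String)
  | [] => []
  | x :: xs => (x :: xs.takeWhile (pvP sep)) :: pvBlocks sep (xs.dropWhile (pvP sep))
termination_by l => l.length
decreasing_by
  have := List.length_dropWhile_le (pvP sep) xs
  simp
  omega

theorem pv_len_nonneg (x : String) : 0 ≤ PySem.Str.len x := by
  simp [PySem.Str.len_eq]

theorem pv_take_takeWhile {α : Type} (p : α → Bool) (l : List α) :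
    l.take (l.takeWhile p).length = l.takeWhile p := by
  induction l with
  | nil => rfl
  | cons x xs ih =>
    rw [List.takeWhile_cons]
    by_cases h : p x = true
    · rw [if_pos h, List.length_cons, List.take_succ_cons, ih]
    · rw [if_neg h, List.length_nil, List.take_zero]

theorem pv_drop_takeWhile {α : Type} (p : α → Bool) (l : List α) :
    l.drop (l.takeWhile p).length = l.dropWhile p := by
  induction l with
  | nil => rfl
  | cons x xs ih =>
    rw [List.takeWhile_cons, List.dropWhile_cons]
    by_cases h : p x = true
    · rw [if_pos h, if_pos h, List.length_cons, List.drop_succ_cons, ih]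
    · rw [if_neg h, if_neg h, List.length_nil, List.drop_zero]

theorem pvFindJ_eq (sep : String) (xs : List String) (k : Nat) :
    pvFindJ sep xs k = k + ((xs.drop k).takeWhile (pvP sep)).length := by
  unfold pvFindJ
  split
  · rename_i h
    rw [List.drop_eq_getElem_cons h, List.takeWhile_cons]
    by_cases hs : PySem.Str.startswith xs[k] sep = true
    · rw [if_neg (not_not_intro hs), if_neg (by simp only [pvP, hs]; simp)]
      simp
    · have hs' : PySem.Str.startswith xs[k] sep = false := by
        rwa [Bool.not_eq_true] at hs
      rw [if_pos hs, if_pos (by simp only [pvP, hs']; rfl)]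
      rw [pvFindJ_eq sep xs (k + 1), List.length_cons]
      omega
  · rename_i h
    rw [List.drop_eq_nil_of_le (by omega)]
    simp
termination_by xs.length - k

theorem pvOuter_eq_pvBlocks (sep : String) (xs : List String) (i : Nat) :
    pvOuter sep xs i = pvBlocks sep (xs.drop i) := by
  unfold pvOuter
  split
  · rename_i h
    have hdrop : xs.drop i = xs[i] :: xs.drop (i + 1) := List.drop_eq_getElem_cons h
    have hj := pvFindJ_eq sep xs (i + 1)
    have hslice : PySem.List.slice xs (some (i : Int)) (some ((pvFindJ sep xs (i + 1)) : Int))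
        = xs[i] :: (xs.drop (i + 1)).takeWhile (pvP sep) := by
      rw [hj, PySem.List.slice_natCast]
      have harith : i + 1 + ((xs.drop (i + 1)).takeWhile (pvP sep)).length - i
          = ((xs.drop (i + 1)).takeWhile (pvP sep)).length + 1 := by omega
      rw [harith, hdrop, List.take_succ_cons, pv_take_takeWhile]
    have hrest : xs.drop (pvFindJ sep xs (i + 1)) = (xs.drop (i + 1)).dropWhile (pvP sep) := by
      rw [hj, ← pv_drop_takeWhile (pvP sep) (xs.drop (i + 1)), List.drop_drop]
    rw [hslice, pvOuter_eq_pvBlocks sep xs (pvFindJ sep xs (i + 1)), hrest, hdrop, pvBlocks]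
  · rename_i h
    rw [List.drop_eq_nil_of_le (by omega)]
    rw [pvBlocks]
termination_by xs.length - i
decreasing_by
  have := pvFindJ_ge sep xs (i + 1)
  omega

-- the four cases of A's loop body, stated once
theorem pvStepA_skip (sep : String) (st : List (List String) × List String) (x : String)
    (h0 : PySem.Str.len x = 0) : pvStepA sep st x = st := by
  unfold pvStepA; rw [if_pos h0]

theorem pvStepA_sep_flush (sep x : String) (acc : List (List String)) (b : List String)
    (h0 : ¬ PySem.Str.len x = 0) (hs : PySem.Str.startswith x sep = true) (hb : b.length > 0) :
    pvStepA sep (acc, b) x = (acc ++ [b], [x]) := by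
  unfold pvStepA; rw [if_neg h0, if_pos hs, if_pos hb]

theorem pvStepA_sep_noflush (sep x : String) (acc : List (List String)) (b : List String)
    (h0 : ¬ PySem.Str.len x = 0) (hs : PySem.Str.startswith x sep = true) (hb : ¬ b.length > 0) :
    pvStepA sep (acc, b) x = (acc, [x]) := by
  unfold pvStepA; rw [if_neg h0, if_pos hs, if_neg hb]

theorem pvStepA_app (sep x : String) (acc : List (List String)) (b : List String)
    (h0 : ¬ PySem.Str.len x = 0) (hs : ¬ PySem.Str.startswith x sep = true) :
    pvStepA sep (acc, b) x = (acc, b ++ [x]) := by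
  unfold pvStepA; rw [if_neg h0, if_neg hs]

-- the accumulator of A's fold factors out
theorem pvFoldA_factor (sep : String) (lines : List String) (acc : List (List String))
    (b : List String) :
    lines.foldl (pvStepA sep) (acc, b) =
      (acc ++ (lines.foldl (pvStepA sep) ([], b)).1, (lines.foldl (pvStepA sep) ([], b)).2) := by
  induction lines generalizing acc b with
  | nil => simp
  | cons x xs ih =>
    rw [List.foldl_cons, List.foldl_cons]
    by_cases h0 : PySem.Str.len x = 0
    · rw [pvStepA_skip sep (acc, b) x h0, pvStepA_skip sep ([], b) x h0, ih]
    · by_cases hs : PySem.Str.startswith x sep = true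
      · by_cases hb : b.length > 0
        · rw [pvStepA_sep_flush sep x acc b h0 hs hb, pvStepA_sep_flush sep x [] b h0 hs hb]
          simp only [List.nil_append]
          rw [ih (acc ++ [b]) [x], ih [b] [x], List.append_assoc]
        · rw [pvStepA_sep_noflush sep x acc b h0 hs hb, pvStepA_sep_noflush sep x [] b h0 hs hb,
            ih acc [x], ih [] [x], List.nil_append]
      · rw [pvStepA_app sep x acc b h0 hs, pvStepA_app sep x [] b h0 hs, ih acc (b ++ [x]),
          ih [] (b ++ [x]), List.nil_append]

-- A's fold from a non-empty current block yields that block, extended to the next separator,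
-- followed by the blocks of the rest of the (filtered) lines
theorem pvFoldA_main (sep : String) (lines : List String) (b : List String) (hb : b ≠ []) :
    (if ((lines.foldl (pvStepA sep) ([], b)).2).length > 0
      then (lines.foldl (pvStepA sep) ([], b)).1 ++ [(lines.foldl (pvStepA sep) ([], b)).2]
      else (lines.foldl (pvStepA sep) ([], b)).1) =
    (b ++ ((lines.filter pvQ).takeWhile (pvP sep))) ::
      pvBlocks sep ((lines.filter pvQ).dropWhile (pvP sep)) := by
  induction lines generalizing b with
  | nil =>
    have hbl : ([] : List String).foldl (pvStepA sep) ([], b) = ([], b) := rfl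
    rw [hbl]
    have : b.length > 0 := by cases b with | nil => exact absurd rfl hb | cons c cs => simp
    rw [if_pos this]
    rw [List.filter_nil, List.takeWhile_nil, List.dropWhile_nil, pvBlocks, List.append_nil,
      List.nil_append]
  | cons x xs ih =>
    rw [List.foldl_cons, List.filter_cons]
    by_cases h0 : PySem.Str.len x = 0
    · have hq : ¬ pvQ x = true := by simp only [pvQ, decide_eq_true_eq]; omega
      rw [pvStepA_skip sep ([], b) x h0, if_neg hq]
      exact ih b hb
    · have hq : pvQ x = true := by
        have := pv_len_nonneg x
        simp only [pvQ, decide_eq_true_eq]; omega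
      rw [if_pos hq, List.takeWhile_cons, List.dropWhile_cons]
      by_cases hs : PySem.Str.startswith x sep = true
      · have hpx : ¬ pvP sep x = true := by simp only [pvP, hs]; simp
        have hbl : b.length > 0 := by cases b with | nil => exact absurd rfl hb | cons c cs => simp
        rw [if_neg hpx, if_neg hpx]
        rw [pvStepA_sep_flush sep x [] b h0 hs hbl]
        simp only [List.nil_append]
        rw [pvFoldA_factor sep xs [b] [x]]
        have hx : ([x] : List String) ≠ [] := by simp
        have hih := ih [x] hx
        by_cases h2 : ((xs.foldl (pvStepA sep) ([], [x])).2).length > 0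
        · rw [if_pos h2] at hih
          rw [if_pos h2, List.append_assoc, ← List.singleton_append, hih, pvBlocks]
          simp
        · rw [if_neg h2] at hih
          rw [if_neg h2, hih, pvBlocks]
          simp
      · have hs' : PySem.Str.startswith x sep = false := by rwa [Bool.not_eq_true] at hs
        have hpx : pvP sep x = true := by simp only [pvP, hs']; rfl
        rw [if_pos hpx, if_pos hpx]
        rw [pvStepA_app sep x [] b h0 hs]
        have hbx : b ++ [x] ≠ [] := by simp
        rw [ih (b ++ [x]) hbx, List.append_assoc, List.singleton_append]

-- starting from the empty block, A computes pvBlocks of the filtered lines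
theorem pvA_eq_pvBlocks (sep : String) (lines : List String) :
    block_cacher_v2 lines sep = pvBlocks sep (lines.filter pvQ) := by
  induction lines with
  | nil => rw [pvBlocks.eq_def]; rfl
  | cons x xs ih =>
    unfold block_cacher_v2 at ih ⊢
    rw [List.foldl_cons, List.filter_cons]
    by_cases h0 : PySem.Str.len x = 0
    · have hq : ¬ pvQ x = true := by simp only [pvQ, decide_eq_true_eq]; omega
      rw [pvStepA_skip sep ([], []) x h0, if_neg hq]
      exact ih
    · have hq : pvQ x = true := by
        have := pv_len_nonneg x
        simp only [pvQ, decide_eq_true_eq]; omega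
      have hstep : pvStepA sep ([], ([] : List String)) x = ([], [x]) := by
        by_cases hs : PySem.Str.startswith x sep = true
        · rw [pvStepA_sep_noflush sep x [] [] h0 hs (by simp)]
        · rw [pvStepA_app sep x [] [] h0 hs, List.nil_append]
      rw [if_pos hq, hstep, pvBlocks]
      have hx : ([x] : List String) ≠ [] := by simp
      have := pvFoldA_main sep xs [x] hx
      rw [this, List.singleton_append]

-- ===== VERDICT (by name: the statement is the Claim_ definition above) =====
theorem block_cacher_v2_spec : Claim_equal_block_cacher_v2 := by
  intro lines separator_first _
  unfold Spec_block_cacher_v2 block_cacher_v2_alt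
  rw [pvOuter_eq_pvBlocks, List.drop_zero]
  exact pvA_eq_pvBlocks separator_first lines
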